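-- pv_equiv track=rewrite | github.com/mualbawi92-cloud/albawi122- | backend/server.py | number_to_arabic
-- ===== SOURCE A (Python) =====
-- def number_to_arabic(num: float) -> str:
--     """Convert number to Arabic words"""
--     if num == 0:
--         return "صفر"
--
--     ones = ["", "واحد", "اثنان", "ثلاثة", "أربعة", "خمسة", "ستة", "سبعة", "ثمانية", "تسعة"]
--     tens = ["", "عشرة", "عشرون", "ثلاثون", "أربعون", "خمسون", "ستون", "سبعون", "ثمانون", "تسعون"]
--     hundreds = ["", "مئة", "مئتان", "ثلاثمئة", "أربعمئة", "خمسمئة", "ستمئة", "سبعمئة", "ثمانمئة", "تسعمئة"]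
--
--     num = int(num)
--
--     if num < 0:
--         return "سالب " + number_to_arabic(-num)
--
--     if num < 10:
--         return ones[num]
--     elif num < 20:
--         if num == 10:
--             return "عشرة"
--         elif num == 11:
--             return "أحد عشر"
--         elif num == 12:
--             return "اثنا عشر"
--         else:
--             return ones[num - 10] + " عشر"
--     elif num < 100:
--         return tens[num // 10] + (" و" + ones[num % 10] if num % 10 != 0 else "")
--     elif num < 1000:
--         return hundreds[num // 100] + (" و" + number_to_arabic(num % 100) if num % 100 != 0 else "")
--     elif num < 1000000:
--         thousands = num // 1000
--         remainder = num % 1000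
--         if thousands == 1:
--             result = "ألف"
--         elif thousands == 2:
--             result = "ألفان"
--         elif thousands <= 10:
--             result = number_to_arabic(thousands) + " آلاف"
--         else:
--             result = number_to_arabic(thousands) + " ألف"
--
--         if remainder != 0:
--             result += " و" + number_to_arabic(remainder)
--         return result
--     elif num < 1000000000:
--         millions = num // 1000000
--         remainder = num % 1000000
--         if millions == 1:
--             result = "مليون"
--         elif millions == 2:
--             result = "مليونان"
--         elif millions <= 10:
--             result = number_to_arabic(millions) + " ملايين"
--         else:
--             result = number_to_arabic(millions) + " مليون"
--
--         if remainder != 0: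
--             result += " و" + number_to_arabic(remainder)
--         return result
--     else:
--         return str(num)  # For very large numbers, just return the number
-- ===== SOURCE B (Python) =====
-- ONES = ["", "واحد", "اثنان", "ثلاثة", "أربعة", "خمسة", "ستة", "سبعة", "ثمانية", "تسعة"]
-- TENS = ["", "عشرة", "عشرون", "ثلاثون", "أربعون", "خمسون", "ستون", "سبعون", "ثمانون", "تسعون"]
-- HUNDREDS = ["", "مئة", "مئتان", "ثلاثمئة", "أربعمئة", "خمسمئة", "ستمئة", "سبعمئة", "ثمانمئة", "تسعمئة"]
--
--
-- def _small(n: int) -> str: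
--     """Words for 1 <= n <= 999, built as a parts table joined with ' و'."""
--     parts = []
--     h, r = divmod(n, 100)
--     if h:
--         parts.append(HUNDREDS[h])
--     if r:
--         if r < 10:
--             parts.append(ONES[r])
--         elif r == 10:
--             parts.append("عشرة")
--         elif r == 11:
--             parts.append("أحد عشر")
--         elif r == 12:
--             parts.append("اثنا عشر")
--         elif r < 20:
--             parts.append(ONES[r - 10] + " عشر")
--         else:
--             t, o = divmod(r, 10)
--             parts.append(TENS[t])
--             if o:
--                 parts.append(ONES[o])
--     return " و".join(parts)
--
--
-- def _scale(c: int, singular: str, dual: str, plural: str) -> str: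
--     """Count word for c of some scale (c <= 999 here)."""
--     if c == 1:
--         return singular
--     if c == 2:
--         return dual
--     return _small(c) + " " + (plural if c <= 10 else singular)
--
--
-- def number_to_arabic(num: float) -> str:
--     """Convert number to Arabic words"""
--     n = int(num)
--     if n == 0:
--         return "صفر"
--     if n < 0:
--         return "سالب " + number_to_arabic(-n)
--     if n >= 1000000000:
--         return str(n)
--     m, rest = divmod(n, 1000000)
--     t, u = divmod(rest, 1000)
--     comps = []
--     if m:
--         comps.append(_scale(m, "مليون", "مليونان", "ملايين"))
--     if t:
--         comps.append(_scale(t, "ألف", "ألفان", "آلاف"))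
--     if u:
--         comps.append(_small(u))
--     return " و".join(comps)
-- ===== Notes on version B (the rewrite author's own statement) =====
-- stated objective: simpler
-- what changed: B replaces A's nested recursive branch chain by a flat decomposition: a words helper for the numbers below one thousand built as a parts list joined with the Arabic conjunction, a scale-word helper, and a main routine that peels the millions/thousands/units groups with divmod and joins the nonzero components, recursing only for the sign.
import Mathlib
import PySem

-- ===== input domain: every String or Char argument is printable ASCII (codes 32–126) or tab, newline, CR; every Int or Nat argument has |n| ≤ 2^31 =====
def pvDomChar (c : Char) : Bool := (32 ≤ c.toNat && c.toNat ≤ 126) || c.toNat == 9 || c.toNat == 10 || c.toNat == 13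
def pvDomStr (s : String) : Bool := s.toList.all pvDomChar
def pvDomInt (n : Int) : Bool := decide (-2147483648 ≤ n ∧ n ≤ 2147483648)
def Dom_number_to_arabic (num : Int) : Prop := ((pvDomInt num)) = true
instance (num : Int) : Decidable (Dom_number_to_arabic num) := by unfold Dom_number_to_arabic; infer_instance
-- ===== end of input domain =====

-- B re-implements A by peeling three-digit groups with divmod and joining the nonzero
-- components with " و" (objective: simpler decomposition, same values; no speed claim).

-- ===== PORT A =====
-- Python A's local tables (the same list literals it builds on every call).
def aOnes : List String :=
  ["", "واحد", "اثنان", "ثلاثة", "أربعة", "خمسة", "ستة", "سبعة", "ثمانية", "تسعة"]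
def aTens : List String :=
  ["", "عشرة", "عشرون", "ثلاثون", "أربعون", "خمسون", "ستون", "سبعون", "ثمانون", "تسعون"]
def aHundreds : List String :=
  ["", "مئة", "مئتان", "ثلاثمئة", "أربعمئة", "خمسمئة", "ستمئة", "سبعمئة", "ثمانمئة", "تسعمئة"]

-- Literal transliteration of A's recursive branch chain; the Nat argument is pure fuel
-- (a totality guard: A's recursion depth is at most 5, the wrapper passes 12).
def aGo : Nat → Int → String
  | 0, _ => ""
  | fuel + 1, num =>
    if num = 0 then "صفر"
    else if num < 0 then "سالب " ++ aGo fuel (-num)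
    else if num < 10 then PySem.List.pyGetD aOnes num ""
    else if num < 20 then
      if num = 10 then "عشرة"
      else if num = 11 then "أحد عشر"
      else if num = 12 then "اثنا عشر"
      else PySem.List.pyGetD aOnes (num - 10) "" ++ " عشر"
    else if num < 100 then
      PySem.List.pyGetD aTens (PySem.Int.floordiv num 10) "" ++
        (if PySem.Int.mod num 10 ≠ 0 then " و" ++ PySem.List.pyGetD aOnes (PySem.Int.mod num 10) "" else "")
    else if num < 1000 then
      PySem.List.pyGetD aHundreds (PySem.Int.floordiv num 100) "" ++
        (if PySem.Int.mod num 100 ≠ 0 then " و" ++ aGo fuel (PySem.Int.mod num 100) else "")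
    else if num < 1000000 then
      let thousands := PySem.Int.floordiv num 1000
      let remainder := PySem.Int.mod num 1000
      let result :=
        if thousands = 1 then "ألف"
        else if thousands = 2 then "ألفان"
        else if thousands ≤ 10 then aGo fuel thousands ++ " آلاف"
        else aGo fuel thousands ++ " ألف"
      if remainder ≠ 0 then result ++ (" و" ++ aGo fuel remainder) else result
    else if num < 1000000000 then
      let millions := PySem.Int.floordiv num 1000000
      let remainder := PySem.Int.mod num 1000000
      let result :=
        if millions = 1 then "مليون"
        else if millions = 2 then "مليونان"
        else if millions ≤ 10 then aGo fuel millions ++ " ملايين"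
        else aGo fuel millions ++ " مليون"
      if remainder ≠ 0 then result ++ (" و" ++ aGo fuel remainder) else result
    else PySem.Int.toStr num

def number_to_arabic (num : Int) : String := aGo 12 num

-- ===== PORT B =====
def bONES : List String :=
  ["", "واحد", "اثنان", "ثلاثة", "أربعة", "خمسة", "ستة", "سبعة", "ثمانية", "تسعة"]
def bTENS : List String :=
  ["", "عشرة", "عشرون", "ثلاثون", "أربعون", "خمسون", "ستون", "سبعون", "ثمانون", "تسعون"]
def bHUNDREDS : List String :=
  ["", "مئة", "مئتان", "ثلاثمئة", "أربعمئة", "خمسمئة", "ستمئة", "سبعمئة", "ثمانمئة", "تسعمئة"]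

-- Source B _small: words for 1..999 as a parts list joined with " و".
def bSmall (n : Int) : String :=
  let h := PySem.Int.floordiv n 100
  let r := PySem.Int.mod n 100
  let parts : List String := []
  let parts := if h ≠ 0 then parts ++ [PySem.List.pyGetD bHUNDREDS h ""] else parts
  let parts :=
    if r ≠ 0 then
      if r < 10 then parts ++ [PySem.List.pyGetD bONES r ""]
      else if r = 10 then parts ++ ["عشرة"]
      else if r = 11 then parts ++ ["أحد عشر"]
      else if r = 12 then parts ++ ["اثنا عشر"]
      else if r < 20 then parts ++ [PySem.List.pyGetD bONES (r - 10) "" ++ " عشر"]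
      else
        let t := PySem.Int.floordiv r 10
        let o := PySem.Int.mod r 10
        let parts := parts ++ [PySem.List.pyGetD bTENS t ""]
        if o ≠ 0 then parts ++ [PySem.List.pyGetD bONES o ""] else parts
    else parts
  PySem.Str.join " و" parts

-- Source B _scale: count word for c (here always 1 ≤ c ≤ 999) of a scale.
def bScale (c : Int) (singular dual plural : String) : String :=
  if c = 1 then singular
  else if c = 2 then dual
  else bSmall c ++ " " ++ (if c ≤ 10 then plural else singular)

def number_to_arabic_alt (num : Int) : String :=
  if num = 0 then "صفر"
  else if num < 0 then "سالب " ++ number_to_arabic_alt (-num)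
  else if 1000000000 ≤ num then PySem.Int.toStr num
  else
    let m := PySem.Int.floordiv num 1000000
    let rest := PySem.Int.mod num 1000000
    let t := PySem.Int.floordiv rest 1000
    let u := PySem.Int.mod rest 1000
    let comps : List String :=
      (if m ≠ 0 then [bScale m "مليون" "مليونان" "ملايين"] else []) ++
      (if t ≠ 0 then [bScale t "ألف" "ألفان" "آلاف"] else []) ++
      (if u ≠ 0 then [bSmall u] else [])
    PySem.Str.join " و" comps
termination_by (if num < 0 then 1 else 0 : Nat)
decreasing_by
  split_ifs with h1 h2 <;> omega

-- ===== PRECONDITION & SPEC =====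
def Spec_number_to_arabic (num : Int) (out : String) : Prop := out = number_to_arabic_alt num
instance (num : Int) (out : String) : Decidable (Spec_number_to_arabic num out) := by unfold Spec_number_to_arabic; infer_instance

-- ===== CLAIM (what is proved, stated in full; the proofs are below) =====
def Claim_equal_number_to_arabic : Prop := ∀ (num : Int), Dom_number_to_arabic num → Spec_number_to_arabic num (number_to_arabic num)

-- ===== LEMMAS AND PROOFS =====

-- join of one/two/three parts with the separator, in the association A's appends produce
theorem sjoin_one (s x : String) : PySem.Str.join s [x] = x := by
  apply String.toList_injective; simp [PySem.Str.join, PySem.Chars.join_singleton]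

theorem sjoin_two (s x y : String) : PySem.Str.join s [x, y] = x ++ (s ++ y) := by
  apply String.toList_injective; simp [PySem.Str.join, PySem.Chars.join_cons_cons, PySem.Chars.join_singleton]

theorem sjoin_three (s x y z : String) : PySem.Str.join s [x, y, z] = x ++ (s ++ (y ++ (s ++ z))) := by
  apply String.toList_injective; simp [PySem.Str.join, PySem.Chars.join_cons_cons, PySem.Chars.join_singleton]

-- one unfolding step of A's port (definitional)
theorem aGo_succ (fuel : Nat) (num : Int) : aGo (fuel + 1) num =
    (if num = 0 then "صفر"
    else if num < 0 then "سالب " ++ aGo fuel (-num)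
    else if num < 10 then PySem.List.pyGetD aOnes num ""
    else if num < 20 then
      if num = 10 then "عشرة"
      else if num = 11 then "أحد عشر"
      else if num = 12 then "اثنا عشر"
      else PySem.List.pyGetD aOnes (num - 10) "" ++ " عشر"
    else if num < 100 then
      PySem.List.pyGetD aTens (PySem.Int.floordiv num 10) "" ++
        (if PySem.Int.mod num 10 ≠ 0 then " و" ++ PySem.List.pyGetD aOnes (PySem.Int.mod num 10) "" else "")
    else if num < 1000 then
      PySem.List.pyGetD aHundreds (PySem.Int.floordiv num 100) "" ++
        (if PySem.Int.mod num 100 ≠ 0 then " و" ++ aGo fuel (PySem.Int.mod num 100) else "")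
    else if num < 1000000 then
      let thousands := PySem.Int.floordiv num 1000
      let remainder := PySem.Int.mod num 1000
      let result :=
        if thousands = 1 then "ألف"
        else if thousands = 2 then "ألفان"
        else if thousands ≤ 10 then aGo fuel thousands ++ " آلاف"
        else aGo fuel thousands ++ " ألف"
      if remainder ≠ 0 then result ++ (" و" ++ aGo fuel remainder) else result
    else if num < 1000000000 then
      let millions := PySem.Int.floordiv num 1000000
      let remainder := PySem.Int.mod num 1000000
      let result :=
        if millions = 1 then "مليون"
        else if millions = 2 then "مليونان"
        else if millions ≤ 10 then aGo fuel millions ++ " ملايين"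
        else aGo fuel millions ++ " مليون"
      if remainder ≠ 0 then result ++ (" و" ++ aGo fuel remainder) else result
    else PySem.Int.toStr num) := rfl

set_option maxHeartbeats 2000000 in
theorem aGo_eq_bSmall_lt100 (fuel : Nat) (n : Int) (h1 : 1 ≤ n) (h2 : n < 100) :
    aGo (fuel + 1) n = bSmall n := by
  have hm : PySem.Int.mod n 100 = n := by rw [PySem.Int.mod_eq_emod_of_pos (by omega)]; omega
  have hd : PySem.Int.floordiv n 100 = 0 := by rw [PySem.Int.floordiv_eq_ediv_of_pos (by omega)]; omega
  have e1 : bONES = aOnes := rfl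
  have e2 : bTENS = aTens := rfl
  simp only [aGo, bSmall, hm, hd, e1, e2, ne_eq, not_true_eq_false, if_false]
  split_ifs <;> first | omega | simp [sjoin_one, sjoin_two]

set_option maxHeartbeats 1000000 in
theorem aGo_eq_bSmall (fuel : Nat) (n : Int) (h1 : 1 ≤ n) (h2 : n < 1000) :
    aGo (fuel + 2) n = bSmall n := by
  by_cases hc : n < 100
  · exact aGo_eq_bSmall_lt100 (fuel + 1) n h1 hc
  · have hr_lt : PySem.Int.mod n 100 < 100 := PySem.Int.mod_lt n (by omega)
    have hr_nn : 0 ≤ PySem.Int.mod n 100 := PySem.Int.mod_nonneg n (by omega)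
    have hdn : ¬ PySem.Int.floordiv n 100 = 0 := by
      rw [PySem.Int.floordiv_eq_ediv_of_pos (by omega)]; omega
    have hm' : PySem.Int.mod (PySem.Int.mod n 100) 100 = PySem.Int.mod n 100 := by
      rw [PySem.Int.mod_eq_emod_of_pos (by omega), PySem.Int.mod_eq_emod_of_pos (by omega)]; omega
    have hd' : PySem.Int.floordiv (PySem.Int.mod n 100) 100 = 0 := by
      rw [PySem.Int.floordiv_eq_ediv_of_pos (by omega), PySem.Int.mod_eq_emod_of_pos (by omega)]; omega
    rw [show fuel + 2 = (fuel + 1) + 1 from rfl, aGo_succ,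
        if_neg (by omega), if_neg (by omega), if_neg (by omega), if_neg (by omega),
        if_neg hc, if_pos h2]
    by_cases hr0 : PySem.Int.mod n 100 = 0
    · rw [if_neg (by simpa using hr0)]
      have e3 : bHUNDREDS = aHundreds := rfl
      simp only [bSmall, hr0, e3, ne_eq, not_true_eq_false, if_false, if_pos hdn]
      simp [sjoin_one]
    · rw [if_pos (by simpa using hr0),
          aGo_eq_bSmall_lt100 fuel _ (by omega) hr_lt]
      have e1 : bONES = aOnes := rfl
      have e2 : bTENS = aTens := rfl
      have e3 : bHUNDREDS = aHundreds := rfl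
      simp only [bSmall, hm', hd', e1, e2, e3, ne_eq, not_true_eq_false, if_false,
        if_pos hdn, if_pos hr0]
      split_ifs <;> first | omega | simp [sjoin_one, sjoin_two, sjoin_three]


theorem alt_eq_bSmall (n : Int) (h1 : 1 ≤ n) (h2 : n < 1000) :
    number_to_arabic_alt n = bSmall n := by
  have hm6 : PySem.Int.mod n 1000000 = n := by rw [PySem.Int.mod_eq_emod_of_pos (by omega)]; omega
  have hd6 : PySem.Int.floordiv n 1000000 = 0 := by rw [PySem.Int.floordiv_eq_ediv_of_pos (by omega)]; omega
  have hd3 : PySem.Int.floordiv n 1000 = 0 := by rw [PySem.Int.floordiv_eq_ediv_of_pos (by omega)]; omega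
  have hm3 : PySem.Int.mod n 1000 = n := by rw [PySem.Int.mod_eq_emod_of_pos (by omega)]; omega
  rw [number_to_arabic_alt]
  rw [if_neg (by omega), if_neg (by omega), if_neg (by omega)]
  simp only [hm6, hd6, hd3, hm3, ne_eq, not_true_eq_false, if_false]
  rw [if_pos (by omega)]
  simp [sjoin_one]

theorem aGo_eq_alt_mid (fuel : Nat) (n : Int) (h1 : 1 ≤ n) (h2 : n < 1000000) :
    aGo (fuel + 3) n = number_to_arabic_alt n := by
  by_cases hc : n < 1000
  · rw [show fuel + 3 = (fuel + 1) + 2 from rfl, aGo_eq_bSmall (fuel + 1) n h1 hc,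
        alt_eq_bSmall n h1 hc]
  · have ht1 : 1 ≤ PySem.Int.floordiv n 1000 := by
      rw [PySem.Int.floordiv_eq_ediv_of_pos (by omega)]; omega
    have ht2 : PySem.Int.floordiv n 1000 < 1000 := by
      rw [PySem.Int.floordiv_eq_ediv_of_pos (by omega)]; omega
    have hr_lt : PySem.Int.mod n 1000 < 1000 := PySem.Int.mod_lt n (by omega)
    have hr_nn : 0 ≤ PySem.Int.mod n 1000 := PySem.Int.mod_nonneg n (by omega)
    have hm6 : PySem.Int.mod n 1000000 = n := by rw [PySem.Int.mod_eq_emod_of_pos (by omega)]; omega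
    have hd6 : PySem.Int.floordiv n 1000000 = 0 := by rw [PySem.Int.floordiv_eq_ediv_of_pos (by omega)]; omega
    rw [show fuel + 3 = (fuel + 2) + 1 from rfl, aGo_succ,
        if_neg (show ¬ n = 0 by omega), if_neg (show ¬ n < 0 by omega),
        if_neg (show ¬ n < 10 by omega), if_neg (show ¬ n < 20 by omega),
        if_neg (show ¬ n < 100 by omega), if_neg hc, if_pos h2,
        number_to_arabic_alt,
        if_neg (show ¬ n = 0 by omega), if_neg (show ¬ n < 0 by omega),
        if_neg (show ¬ (1000000000:Int) ≤ n by omega)]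
    simp only [hm6, hd6, ne_eq, not_true, if_false,
      if_pos (show ¬ PySem.Int.floordiv n 1000 = 0 by omega)]
    rw [aGo_eq_bSmall fuel _ ht1 ht2]
    by_cases hr0 : PySem.Int.mod n 1000 = 0
    · rw [if_neg (show ¬ ¬ PySem.Int.mod n 1000 = 0 by omega),
          if_neg (show ¬ ¬ PySem.Int.mod n 1000 = 0 by omega)]
      simp only [bScale, List.append_nil, List.nil_append, sjoin_one]
      split_ifs <;> first | omega | (apply String.toList_injective; simp)
    · rw [if_pos (show ¬ PySem.Int.mod n 1000 = 0 by omega),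
          if_pos (show ¬ PySem.Int.mod n 1000 = 0 by omega),
          aGo_eq_bSmall fuel (PySem.Int.mod n 1000) (by omega) hr_lt]
      simp only [bScale, List.nil_append]
      split_ifs <;> first | omega | (apply String.toList_injective; simp [PySem.Chars.join_cons_cons, PySem.Chars.join_singleton])

theorem scale_mil (c : Int) :
    (if c = 1 then "مليون" else if c = 2 then "مليونان"
     else if c ≤ 10 then bSmall c ++ " ملايين" else bSmall c ++ " مليون")
    = bScale c "مليون" "مليونان" "ملايين" := by
  unfold bScale
  split_ifs <;> (apply String.toList_injective; simp)

theorem aGo_eq_alt_top (fuel : Nat) (n : Int) (h1 : 1 ≤ n) (h2 : n < 1000000000) :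
    aGo (fuel + 4) n = number_to_arabic_alt n := by
  by_cases hc : n < 1000000
  · exact aGo_eq_alt_mid (fuel + 1) n h1 hc
  · have hm1 : 1 ≤ PySem.Int.floordiv n 1000000 := by
      rw [PySem.Int.floordiv_eq_ediv_of_pos (by omega)]; omega
    have hm2 : PySem.Int.floordiv n 1000000 < 1000 := by
      rw [PySem.Int.floordiv_eq_ediv_of_pos (by omega)]; omega
    have hrem_lt : PySem.Int.mod n 1000000 < 1000000 := PySem.Int.mod_lt n (by omega)
    have hrem_nn : 0 ≤ PySem.Int.mod n 1000000 := PySem.Int.mod_nonneg n (by omega)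
    rw [show fuel + 4 = (fuel + 3) + 1 from rfl, aGo_succ,
        if_neg (show ¬ n = 0 by omega), if_neg (show ¬ n < 0 by omega),
        if_neg (show ¬ n < 10 by omega), if_neg (show ¬ n < 20 by omega),
        if_neg (show ¬ n < 100 by omega), if_neg (show ¬ n < 1000 by omega),
        if_neg hc, if_pos h2]
    rw [number_to_arabic_alt,
        if_neg (show ¬ n = 0 by omega), if_neg (show ¬ n < 0 by omega),
        if_neg (show ¬ (1000000000:Int) ≤ n by omega)]
    simp only [ne_eq, if_pos (show ¬ PySem.Int.floordiv n 1000000 = 0 by omega)]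
    rw [show fuel + 3 = (fuel + 1) + 2 from rfl,
        aGo_eq_bSmall (fuel + 1) (PySem.Int.floordiv n 1000000) hm1 hm2,
        scale_mil, show (fuel + 1) + 2 = fuel + 3 from rfl]
    by_cases hrem0 : PySem.Int.mod n 1000000 = 0
    · rw [if_neg (show ¬ ¬ PySem.Int.mod n 1000000 = 0 by omega)]
      have h0d : PySem.Int.floordiv (PySem.Int.mod n 1000000) 1000 = 0 := by
        rw [hrem0]; rfl
      have h0m : PySem.Int.mod (PySem.Int.mod n 1000000) 1000 = 0 := by
        rw [hrem0]; rfl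
      simp only [h0d, h0m, not_true, if_false, List.append_nil, sjoin_one]
    · have hrem1 : 1 ≤ PySem.Int.mod n 1000000 := by omega
      rw [if_pos (show ¬ PySem.Int.mod n 1000000 = 0 by omega),
          aGo_eq_alt_mid fuel (PySem.Int.mod n 1000000) hrem1 hrem_lt,
          number_to_arabic_alt,
          if_neg (show ¬ PySem.Int.mod n 1000000 = 0 by omega),
          if_neg (show ¬ PySem.Int.mod n 1000000 < 0 by omega),
          if_neg (show ¬ (1000000000:Int) ≤ PySem.Int.mod n 1000000 by omega)]
      have hm66 : PySem.Int.mod (PySem.Int.mod n 1000000) 1000000 = PySem.Int.mod n 1000000 := by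
        rw [PySem.Int.mod_eq_emod_of_pos (by omega), PySem.Int.mod_eq_emod_of_pos (by omega)]; omega
      have hd66 : PySem.Int.floordiv (PySem.Int.mod n 1000000) 1000000 = 0 := by
        rw [PySem.Int.floordiv_eq_ediv_of_pos (by omega), PySem.Int.mod_eq_emod_of_pos (by omega)]; omega
      have hsplit := PySem.Int.floordiv_mul_add_mod (PySem.Int.mod n 1000000) 1000
      simp only [hm66, hd66, ne_eq, not_true, if_false, List.nil_append]
      split_ifs <;> first
        | omega
        | (apply String.toList_injective; simp [PySem.Chars.join_cons_cons, PySem.Chars.join_singleton])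

theorem aGo_eq_alt_pos (fuel : Nat) (n : Int) (h1 : 1 ≤ n) :
    aGo (fuel + 4) n = number_to_arabic_alt n := by
  by_cases hb : n < 1000000000
  · exact aGo_eq_alt_top fuel n h1 hb
  · rw [show fuel + 4 = (fuel + 3) + 1 from rfl, aGo_succ,
        if_neg (show ¬ n = 0 by omega), if_neg (show ¬ n < 0 by omega),
        if_neg (show ¬ n < 10 by omega), if_neg (show ¬ n < 20 by omega),
        if_neg (show ¬ n < 100 by omega), if_neg (show ¬ n < 1000 by omega),
        if_neg (show ¬ n < 1000000 by omega), if_neg (show ¬ n < 1000000000 by omega),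
        number_to_arabic_alt,
        if_neg (show ¬ n = 0 by omega), if_neg (show ¬ n < 0 by omega),
        if_pos (show (1000000000:Int) ≤ n by omega)]

-- ===== VERDICT (by name: the statement is the Claim_ definition above) =====
theorem number_to_arabic_spec : Claim_equal_number_to_arabic := by
  intro num _
  unfold Spec_number_to_arabic number_to_arabic
  rcases lt_trichotomy num 0 with hneg | h0 | hpos
  · rw [show (12:Nat) = 11 + 1 from rfl, aGo_succ,
        if_neg (show ¬ num = 0 by omega), if_pos hneg,
        number_to_arabic_alt, if_neg (show ¬ num = 0 by omega), if_pos hneg,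
        show (11:Nat) = 7 + 4 from rfl, aGo_eq_alt_pos 7 (-num) (by omega)]
  · subst h0
    rw [show (12:Nat) = 11 + 1 from rfl, aGo_succ, if_pos rfl,
        number_to_arabic_alt, if_pos rfl]
  · rw [show (12:Nat) = 8 + 4 from rfl, aGo_eq_alt_pos 8 num (by omega)]
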